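-- pv_equiv track=rewrite | github.com/bioinf/proteomics2014 | bushmanovae/hw1/AlignmentsUtils.py | tracebackSequences
-- ===== SOURCE A (Python) =====
-- def tracebackSequences(str1, str2, back, v, w, i, j):
--     if i == -1 or j == -1:
--         if i == -1:
--             while j > -1:
--                 str1 += '*'
--                 str2 += w[j]
--                 j -= 1
--         if j == -1:
--             while i > -1:
--                 str1 += v[i]
--                 str2 += '*'
--                 i -= 1
--         return str1, str2
--
--     if back[i, j] == (i, j - 1):
--         str1, str2 = tracebackSequences(str1, str2, back, v, w, i, j - 1)
--         str1 += '*'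
--         str2 += w[j]
--     elif back[i, j] == (i - 1, j):
--         str1, str2 = tracebackSequences(str1, str2, back, v, w, i - 1, j)
--         str1 += v[i]
--         str2 += '*'
--     else:
--         str1, str2 = tracebackSequences(str1, str2, back, v, w, i - 1, j - 1)
--         str1 += v[i]
--         str2 += w[j]
--     return str1, str2
-- ===== SOURCE B (Python) =====
-- def tracebackSequences(str1, str2, back, v, w, i, j):
--     # iterative traceback: collect step pairs high-to-low, fill base gaps, append steps reversed
--     steps = []
--     while i >= 0 and j >= 0:
--         ptr = back[i, j]
--         if ptr == (i, j - 1):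
--             steps.append(('*', w[j]))
--             j -= 1
--         elif ptr == (i - 1, j):
--             steps.append((v[i], '*'))
--             i -= 1
--         else:
--             steps.append((v[i], w[j]))
--             i -= 1
--             j -= 1
--     if i == -1:
--         while j > -1:
--             str1 += '*'
--             str2 += w[j]
--             j -= 1
--     if j == -1:
--         while i > -1:
--             str1 += v[i]
--             str2 += '*'
--             i -= 1
--     for c1, c2 in reversed(steps):
--         str1 += c1
--         str2 += c2
--     return str1, str2
-- ===== Notes on version B (the rewrite author's own statement) =====
-- stated objective: alternative
-- what changed: Replaces A's recursion (append after the recursive call returns) by an iterative walk that collects the step character pairs high-to-low, fills the base gaps directly onto str1/str2, then appends the collected pairs in reversed order.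
import Mathlib
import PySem

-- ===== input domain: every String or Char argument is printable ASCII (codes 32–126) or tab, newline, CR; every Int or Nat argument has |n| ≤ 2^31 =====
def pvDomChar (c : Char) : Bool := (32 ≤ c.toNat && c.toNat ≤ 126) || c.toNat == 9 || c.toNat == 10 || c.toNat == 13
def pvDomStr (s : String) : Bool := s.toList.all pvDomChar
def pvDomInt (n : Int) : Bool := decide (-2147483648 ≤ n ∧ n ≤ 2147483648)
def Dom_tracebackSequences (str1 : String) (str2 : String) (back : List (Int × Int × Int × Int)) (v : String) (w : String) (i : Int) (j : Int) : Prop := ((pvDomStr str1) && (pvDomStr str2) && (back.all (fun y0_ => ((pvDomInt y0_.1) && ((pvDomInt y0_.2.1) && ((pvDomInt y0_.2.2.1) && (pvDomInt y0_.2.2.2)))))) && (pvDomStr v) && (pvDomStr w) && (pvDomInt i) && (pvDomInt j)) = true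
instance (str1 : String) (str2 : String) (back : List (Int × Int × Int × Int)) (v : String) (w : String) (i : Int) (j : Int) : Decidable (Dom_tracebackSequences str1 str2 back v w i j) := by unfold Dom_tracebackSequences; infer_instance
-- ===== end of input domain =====

-- B rebuilds the traceback iteratively (collect step pairs on a descending walk, fill the base
-- gaps, then append the collected pairs in reverse) instead of A's recursion; objective: alternative.

-- ===== PORT A =====
-- shared primitive: dict lookup back[(i,j)] (assoc list, first match); none = KeyError (outside Pre_)
def pvBackGet? (back : List (Int × Int × Int × Int)) (i j : Int) : Option (Int × Int) :=
  match back.find? (fun e => e.1 == i && e.2.1 == j) with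
  | some e => some (e.2.2.1, e.2.2.2)
  | none => none

-- shared primitive: s[k]; the default is never reached inside Pre_ (Python raises IndexError there)
def pvCharD (s : String) (k : Int) : Char := (PySem.Str.pyGet? s k).getD '?'

-- 'while j > -1: str1 += '*'; str2 += w[j]; j -= 1' — runs exactly (j+1).toNat times, the fuel below
def pvFillWGo : Nat → String → String → String → Int → String × String
  | 0, s1, s2, _, _ => (s1, s2)
  | n + 1, s1, s2, w, j => pvFillWGo n (s1.push '*') (s2.push (pvCharD w j)) w (j - 1)

def pvFillW (str1 str2 : String) (w : String) (j : Int) : String × String :=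
  pvFillWGo (j + 1).toNat str1 str2 w j

-- 'while i > -1: str1 += v[i]; str2 += '*'; i -= 1' — runs exactly (i+1).toNat times
def pvFillVGo : Nat → String → String → String → Int → String × String
  | 0, s1, s2, _, _ => (s1, s2)
  | n + 1, s1, s2, v, i => pvFillVGo n (s1.push (pvCharD v i)) (s2.push '*') v (i - 1)

def pvFillV (str1 str2 : String) (v : String) (i : Int) : String × String :=
  pvFillVGo (i + 1).toNat str1 str2 v i

-- A's base case (the two gap-filling while loops; the triple carries the mutated j)
def pvBase (str1 str2 v w : String) (i j : Int) : String × String :=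
  let p : String × String × Int :=
    if i = -1 then
      let q := pvFillW str1 str2 w j
      (q.1, q.2, if j > -1 then (-1 : Int) else j)
    else (str1, str2, j)
  if p.2.2 = -1 then pvFillV p.1 p.2.1 v i else (p.1, p.2.1)

-- A's recursion, fuel-guarded (fuel suffices on Pre_; on fuel-out / missing key Python raises, outside Pre_)
def pvTbA (fuel : Nat) (str1 str2 : String) (back : List (Int × Int × Int × Int)) (v w : String) (i j : Int) : String × String :=
  match fuel with
  | 0 => (str1, str2)
  | fuel + 1 =>
    if i = -1 ∨ j = -1 then pvBase str1 str2 v w i j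
    else
      match pvBackGet? back i j with
      | none => (str1, str2)
      | some ptr =>
        if ptr = (i, j - 1) then
          let p := pvTbA fuel str1 str2 back v w i (j - 1)
          (p.1.push '*', p.2.push (pvCharD w j))
        else if ptr = (i - 1, j) then
          let p := pvTbA fuel str1 str2 back v w (i - 1) j
          (p.1.push (pvCharD v i), p.2.push '*')
        else
          let p := pvTbA fuel str1 str2 back v w (i - 1) (j - 1)
          (p.1.push (pvCharD v i), p.2.push (pvCharD w j))

def pvFuel (i j : Int) : Nat := (i + 1).toNat + (j + 1).toNat + 1

def tracebackSequences (str1 : String) (str2 : String) (back : List (Int × Int × Int × Int)) (v : String) (w : String) (i : Int) (j : Int) : String × String :=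
  pvTbA (pvFuel i j) str1 str2 back v w i j

-- ===== PORT B =====
-- B's while loop: walk the pointers downward, collecting the (char-for-str1, char-for-str2) pairs
def pvCollect (fuel : Nat) (back : List (Int × Int × Int × Int)) (v w : String) (i j : Int) : List (Char × Char) × Int × Int :=
  match fuel with
  | 0 => ([], i, j)
  | fuel + 1 =>
    if 0 ≤ i ∧ 0 ≤ j then
      match pvBackGet? back i j with
      | none => ([], i, j)
      | some ptr =>
        let s : (Char × Char) × Int × Int :=
          if ptr = (i, j - 1) then (('*', pvCharD w j), i, j - 1)
          else if ptr = (i - 1, j) then ((pvCharD v i, '*'), i - 1, j)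
          else ((pvCharD v i, pvCharD w j), i - 1, j - 1)
        let r := pvCollect fuel back v w s.2.1 s.2.2
        (s.1 :: r.1, r.2)
    else ([], i, j)

-- 'for c1, c2 in …: str1 += c1; str2 += c2'
def pvEmit (p : String × String) (steps : List (Char × Char)) : String × String :=
  steps.foldl (fun q c => (q.1.push c.1, q.2.push c.2)) p

def tracebackSequences_alt (str1 : String) (str2 : String) (back : List (Int × Int × Int × Int)) (v : String) (w : String) (i : Int) (j : Int) : String × String :=
  let r := pvCollect (pvFuel i j) back v w i j
  pvEmit (pvBase str1 str2 v w r.2.1 r.2.2) r.1.reverse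

-- ===== PRECONDITION & SPEC =====
-- Pre_ excludes inputs where Python raises: i or j below -1 (infinite descent / KeyError), an index
-- out of range (IndexError), or a missing backpointer key. It asks for backpointer entries on the
-- whole rectangle [0,i]×[0,j] (the DP-matrix shape A is written for): this is a closed-form
-- superset of the keys the traced path visits, so it also excludes some inputs where A happens to
-- return because exactly the path's keys exist.
def Pre_tracebackSequences (str1 : String) (str2 : String) (back : List (Int × Int × Int × Int)) (v : String) (w : String) (i : Int) (j : Int) : Prop :=
  -1 ≤ i ∧ -1 ≤ j ∧ i < PySem.Str.len v ∧ j < PySem.Str.len w ∧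
  ∀ a ∈ PySem.List.pyRange 0 (i + 1) 1, ∀ b ∈ PySem.List.pyRange 0 (j + 1) 1,
    (pvBackGet? back a b).isSome = true
instance (str1 : String) (str2 : String) (back : List (Int × Int × Int × Int)) (v : String) (w : String) (i : Int) (j : Int) : Decidable (Pre_tracebackSequences str1 str2 back v w i j) := by unfold Pre_tracebackSequences; infer_instance

def pvWitness_tracebackSequences : String × String × (List (Int × Int × Int × Int)) × String × String × Int × Int :=
  ("", "", [(1, 1, 0, 0), (0, 1, 0, 0), (1, 0, 0, 0), (0, 0, -1, -1)], "ab", "cd", 1, 1)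

def Spec_tracebackSequences (str1 : String) (str2 : String) (back : List (Int × Int × Int × Int)) (v : String) (w : String) (i : Int) (j : Int) (out : String × String) : Prop := out = tracebackSequences_alt str1 str2 back v w i j
instance (str1 : String) (str2 : String) (back : List (Int × Int × Int × Int)) (v : String) (w : String) (i : Int) (j : Int) (out : String × String) : Decidable (Spec_tracebackSequences str1 str2 back v w i j out) := by unfold Spec_tracebackSequences; infer_instance

-- ===== CLAIM (what is proved, stated in full; the proofs are below) =====
def Claim_equal_tracebackSequences : Prop := ∀ (str1 : String) (str2 : String) (back : List (Int × Int × Int × Int)) (v : String) (w : String) (i : Int) (j : Int), Dom_tracebackSequences str1 str2 back v w i j → Pre_tracebackSequences str1 str2 back v w i j → Spec_tracebackSequences str1 str2 back v w i j (tracebackSequences str1 str2 back v w i j)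

-- ===== LEMMAS AND PROOFS =====

lemma pvEmit_snoc (p : String × String) (l : List (Char × Char)) (c : Char × Char) :
    pvEmit p (l ++ [c]) = ((pvEmit p l).1.push c.1, (pvEmit p l).2.push c.2) := by
  simp [pvEmit, List.foldl_append]

lemma pvBase_pos (str1 str2 v w : String) (i j : Int) (hi : 0 ≤ i) (hj : 0 ≤ j) :
    pvBase str1 str2 v w i j = (str1, str2) := by
  simp only [pvBase]
  have h1 : ¬ i = -1 := by omega
  have h2 : ¬ j = -1 := by omega
  simp [h1, h2]

lemma pvMain (fuel : Nat) (str1 str2 : String) (back : List (Int × Int × Int × Int)) (v w : String)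
    (i j : Int) (hi : -1 ≤ i) (hj : -1 ≤ j)
    (hf : (i + 1).toNat + (j + 1).toNat < fuel) :
    pvTbA fuel str1 str2 back v w i j =
      pvEmit (pvBase str1 str2 v w (pvCollect fuel back v w i j).2.1
                (pvCollect fuel back v w i j).2.2)
             (pvCollect fuel back v w i j).1.reverse := by
  induction fuel generalizing i j with
  | zero => omega
  | succ fuel ih =>
    by_cases hbase : i = -1 ∨ j = -1
    · have hneg : ¬ (0 ≤ i ∧ 0 ≤ j) := by omega
      simp [pvTbA, pvCollect, hbase, hneg, pvEmit]
    · have hi0 : 0 ≤ i := by omega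
      have hj0 : 0 ≤ j := by omega
      have hpos : 0 ≤ i ∧ 0 ≤ j := ⟨hi0, hj0⟩
      simp only [pvTbA, pvCollect, hbase, hpos, if_false]
      cases hlk : pvBackGet? back i j with
      | none => simp [pvBase_pos str1 str2 v w i j hi0 hj0, pvEmit]
      | some ptr =>
        by_cases h1 : ptr = (i, j - 1)
        · simp only [h1, ↓reduceIte]
          rw [ih i (j - 1) (by omega) (by omega) (by omega)]
          simp [pvEmit_snoc]
        · by_cases h2 : ptr = (i - 1, j)
          · simp only [h2, if_true]
            rw [ih (i - 1) j (by omega) (by omega) (by omega)]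
            simp [pvEmit_snoc]
          · simp only [h1, h2, if_false]
            rw [ih (i - 1) (j - 1) (by omega) (by omega) (by omega)]
            simp [pvEmit_snoc]

-- ===== VERDICT (by name: the statement is the Claim_ definition above) =====
theorem tracebackSequences_spec : Claim_equal_tracebackSequences := by
  intro str1 str2 back v w i j _hdom hpre
  obtain ⟨hi, hj, -, -, -⟩ := hpre
  unfold Spec_tracebackSequences tracebackSequences tracebackSequences_alt
  exact pvMain (pvFuel i j) str1 str2 back v w i j hi hj (by unfold pvFuel; omega)
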